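-- pv_equiv track=rewrite | github.com/gustavomotadev/engg57-ransac | ransac_profiler/ransac_profiler.py | my_format
-- ===== SOURCE A (Python) =====
-- def my_format(s):
--     s = list(s)
--     for i in range(len(s)):
--         if s[i] == '0' and i+1 < len(s) and s[i+1] != '.':
--             s[i] = ' '
--         else:
--             break
--     return ''.join(s)
-- ===== SOURCE B (Python) =====
-- def my_format(s):
--     z = 0
--     while z < len(s) and s[z] == '0':
--         z += 1
--     if z == 0:
--         blanks = 0
--     elif z == len(s) or s[z] == '.':
--         blanks = z - 1
--     else:
--         blanks = z
--     return ' ' * blanks + s[blanks:]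
-- ===== Notes on version B (the rewrite author's own statement) =====
-- stated objective: simpler
-- what changed: Instead of mutating a char list cell by cell inside a break-able loop, B counts the leading-zero run once, computes the number of characters to blank by a closed-form case split (keeping the zero before a decimal point and the final zero of an all-zeros string), and returns that many spaces followed by the remaining suffix.
import Mathlib
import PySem

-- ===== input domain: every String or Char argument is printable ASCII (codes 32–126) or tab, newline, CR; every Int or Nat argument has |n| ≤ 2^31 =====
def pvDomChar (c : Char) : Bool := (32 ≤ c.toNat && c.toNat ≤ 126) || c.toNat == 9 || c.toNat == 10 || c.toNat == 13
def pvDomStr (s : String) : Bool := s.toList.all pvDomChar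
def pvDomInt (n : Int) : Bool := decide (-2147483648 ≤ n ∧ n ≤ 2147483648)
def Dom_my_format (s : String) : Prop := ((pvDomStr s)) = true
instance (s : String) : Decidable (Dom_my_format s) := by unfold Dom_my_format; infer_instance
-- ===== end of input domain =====

-- B replaces A's in-place, break-able mutation loop by computing the leading-zero
-- run length once and a closed-form blank count; objective: simpler, same cost.


-- ===== PORT A =====
-- A's loop over indices with break: at index i it blanks s[i] when s[i]='0',
-- i+1 < len and s[i+1] ≠ '.', otherwise breaks leaving the rest unchanged.
def myFormatGoA : List Char → List Char
  | [] => []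
  | [c] => [c]
  | c :: d :: rest =>
    if c = '0' ∧ d ≠ '.' then ' ' :: myFormatGoA (d :: rest) else c :: d :: rest

def my_format (s : String) : String := String.ofList (myFormatGoA s.toList)

-- ===== PORT B =====
-- while z < len(s) and s[z] == '0': z += 1
def myFormatZ : List Char → Nat
  | [] => 0
  | c :: rest => if c = '0' then myFormatZ rest + 1 else 0

def myFormatBlanks (cs : List Char) : Nat :=
  let z := myFormatZ cs
  if z = 0 then 0
  else if z = cs.length ∨ cs.getD z ' ' = '.' then z - 1
  else z

def my_format_alt (s : String) : String :=
  let cs := s.toList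
  let blanks := myFormatBlanks cs
  String.ofList (List.replicate blanks ' ' ++ cs.drop blanks)

-- ===== PRECONDITION & SPEC =====
def Spec_my_format (s : String) (out : String) : Prop := out = my_format_alt s
instance (s : String) (out : String) : Decidable (Spec_my_format s out) := by unfold Spec_my_format; infer_instance

-- ===== CLAIM (what is proved, stated in full; the proofs are below) =====
def Claim_equal_my_format : Prop := ∀ (s : String), Dom_my_format s → Spec_my_format s (my_format s)

-- ===== LEMMAS AND PROOFS =====

lemma myFormatZ_le_length (cs : List Char) : myFormatZ cs ≤ cs.length := by
  induction cs with
  | nil => simp [myFormatZ]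
  | cons c rest ih =>
    simp only [myFormatZ, List.length_cons]
    split <;> omega

lemma goA_eq_blanks (cs : List Char) :
    myFormatGoA cs = List.replicate (myFormatBlanks cs) ' ' ++ cs.drop (myFormatBlanks cs) := by
  induction cs with
  | nil => simp [myFormatGoA, myFormatBlanks, myFormatZ]
  | cons c rest ih =>
    cases rest with
    | nil =>
      by_cases hc : c = '0' <;>
        simp [myFormatGoA, myFormatBlanks, myFormatZ, hc]
    | cons d rest' =>
      by_cases hgo : c = '0' ∧ d ≠ '.'
      · obtain ⟨hc, hd⟩ := hgo
        have h1 : myFormatGoA (c :: d :: rest') = ' ' :: myFormatGoA (d :: rest') := by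
          simp [myFormatGoA, hc, hd]
        have hblanks : myFormatBlanks (c :: d :: rest') = myFormatBlanks (d :: rest') + 1 := by
          by_cases hd0 : d = '0'
          · -- d is a zero: z = z' + 1 with z' ≥ 1, the end/'.' tests shift by one
            have hz : myFormatZ (c :: d :: rest') = myFormatZ rest' + 1 + 1 := by
              simp [myFormatZ, hc, hd0]
            have hz' : myFormatZ (d :: rest') = myFormatZ rest' + 1 := by
              simp [myFormatZ, hd0]
            have hle := myFormatZ_le_length rest'
            simp only [myFormatBlanks, hz, hz', List.length_cons]
            rw [show ((c :: d :: rest').getD (myFormatZ rest' + 1 + 1) ' ')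
                  = ((d :: rest').getD (myFormatZ rest' + 1) ' ') from by simp [List.getD]]
            by_cases hend : myFormatZ rest' = rest'.length
            · simp [hend]
            · by_cases hdot : (d :: rest').getD (myFormatZ rest' + 1) ' ' = '.'
              · simp only [hdot, or_true, if_true]
                split_ifs <;> omega
              · have h2 : ¬(myFormatZ rest' + 1 + 1 = rest'.length + 1 + 1) := by omega
                have h3 : ¬(myFormatZ rest' + 1 = rest'.length + 1) := by omega
                simp only [h2, h3]
                simp
                split_ifs <;> omega
          · -- d non-zero: z = 1, it is neither at the end nor before '.'
            have hz : myFormatZ (c :: d :: rest') = 1 := by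
              simp [myFormatZ, hc, hd0]
            have hz' : myFormatZ (d :: rest') = 0 := by
              simp [myFormatZ, hd0]
            simp [myFormatBlanks, hz, hz', hd]
        rw [h1, ih, hblanks]
        simp [List.replicate_succ]
      · -- loop breaks immediately: either c ≠ '0' or the next char is '.'
        have h1 : myFormatGoA (c :: d :: rest') = c :: d :: rest' := by
          simp only [myFormatGoA]
          rw [if_neg hgo]
        by_cases hc : c = '0'
        · have hd : d = '.' := by
            by_contra h; exact hgo ⟨hc, h⟩
          subst hd
          have hz : myFormatZ (c :: '.' :: rest') = 1 := by
            simp [myFormatZ, hc]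
          simp [h1, myFormatBlanks, hz, List.getD]
        · have hz : myFormatZ (c :: d :: rest') = 0 := by
            simp [myFormatZ, hc]
          simp [h1, myFormatBlanks, hz]

-- ===== VERDICT (by name: the statement is the Claim_ definition above) =====
theorem my_format_spec : Claim_equal_my_format := by
  intro s _
  unfold Spec_my_format my_format my_format_alt
  rw [goA_eq_blanks]
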